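-- pv_equiv track=rewrite | github.com/alex-yung-github/AI | tetrispt2.py | getTop
-- ===== SOURCE A (Python) =====
-- types = {"I0": " " * 12 + "####", "I1": "#" + "   " + "#" + "   " + "#" + "   " + "#" + "   ",
--          "O0": " " * 8 + "##" + "  " + "##" + "  ",
--          "T0": " " * 8 + " #  " + "### ", "T1": " " * 4 + "#   " + "##  " + "#   ", "T2": " " * 8 + "### " + " #  ", "T3": " " * 4 + " #  " + "##  " + " #  ",
--          "S0": " " * 8 + " ## " + "##  ", "S1": " " * 4 + "#   " + "##  " + " #  ",
--          "Z0": " " * 8 + "##  " + " ## ", "Z1": " " * 4 + " #  " + "##  " + "#   ",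
--          "J0": " " * 8 + "#   " + "### ", "J1": " " * 4 + "##  " + "#   " + "#   ", "J2": " " * 8 + "### " + "  # ", "J3": " " * 4 + " #  " + " #  " + "##  ",
--          "L0": " " * 8 + "  # " + "### ", "L1": " " * 4 + "#   " + "#   " + "##  ", "L2": " " * 8 + "### " + "#   ", "L3": " " * 4 + "##  " + " #  " + " #  "}
--
-- def getTop(piece, startpoint):
--     block = types[piece]
--     tops = []
--     # leftheight = 4 - leftmostheight
--     for w in range(1, 4):
--         temptop = 0
--         for h in range(4):
--             index = w + (h*4)
--             if(block[index:index+1] == "#"):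
--                 temptop = 4 - h - (startpoint+1)
--                 break
--         tops.append(temptop)
--     return tops
-- ===== SOURCE B (Python) =====
-- types = {"I0": " " * 12 + "####", "I1": "#" + "   " + "#" + "   " + "#" + "   " + "#" + "   ",
--          "O0": " " * 8 + "##" + "  " + "##" + "  ",
--          "T0": " " * 8 + " #  " + "### ", "T1": " " * 4 + "#   " + "##  " + "#   ", "T2": " " * 8 + "### " + " #  ", "T3": " " * 4 + " #  " + "##  " + " #  ",
--          "S0": " " * 8 + " ## " + "##  ", "S1": " " * 4 + "#   " + "##  " + " #  ",
--          "Z0": " " * 8 + "##  " + " ## ", "Z1": " " * 4 + " #  " + "##  " + "#   ",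
--          "J0": " " * 8 + "#   " + "### ", "J1": " " * 4 + "##  " + "#   " + "#   ", "J2": " " * 8 + "### " + "  # ", "J3": " " * 4 + " #  " + " #  " + "##  ",
--          "L0": " " * 8 + "  # " + "### ", "L1": " " * 4 + "#   " + "#   " + "##  ", "L2": " " * 8 + "### " + "#   ", "L3": " " * 4 + "##  " + " #  " + " #  "}
--
-- def getTop(piece, startpoint):
--     # Extract each column as a strided slice and locate its first '#' with
--     # str.find: no scanning loops at all.
--     block = types[piece]
--     tops = []
--     for w in (1, 2, 3):
--         h = block[w::4].find("#")
--         tops.append(0 if h < 0 else 4 - h - (startpoint + 1))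
--     return tops
-- ===== Notes on version B (the rewrite author's own statement) =====
-- stated objective: simpler
-- what changed: A scans each column with a nested row loop and break; B has no scanning loops at all: it extracts each column as the strided slice block[w::4] and locates its first '#' with str.find.
-- outside the precondition, e.g. on getTop('X9', 0): A raises KeyError, B raises KeyError
import Mathlib
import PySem

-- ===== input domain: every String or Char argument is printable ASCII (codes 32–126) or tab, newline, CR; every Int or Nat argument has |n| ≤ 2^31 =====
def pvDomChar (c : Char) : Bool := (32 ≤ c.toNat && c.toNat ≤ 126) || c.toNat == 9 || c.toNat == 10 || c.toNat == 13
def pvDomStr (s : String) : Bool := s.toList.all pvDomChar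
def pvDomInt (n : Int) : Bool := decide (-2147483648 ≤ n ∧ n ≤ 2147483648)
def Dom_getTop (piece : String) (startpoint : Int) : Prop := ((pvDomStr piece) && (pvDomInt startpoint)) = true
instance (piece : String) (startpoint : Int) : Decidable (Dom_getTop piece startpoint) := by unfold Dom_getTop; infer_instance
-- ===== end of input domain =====

-- B replaces A's nested scanning loops by extracting each column as a strided
-- slice block[w::4] and locating its first '#' with str.find (objective:
-- simpler, same cost).

-- the module-level 'types' dict, shared context of both programs
def typesDict : PySem.Dict String String := PySem.Dict.ofList
  [("I0", "            ####"), ("I1", "#   #   #   #   "),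
   ("O0", "        ##  ##  "),
   ("T0", "         #  ### "), ("T1", "    #   ##  #   "), ("T2", "        ###  #  "), ("T3", "     #  ##   #  "),
   ("S0", "         ## ##  "), ("S1", "    #   ##   #  "),
   ("Z0", "        ##   ## "), ("Z1", "     #  ##  #   "),
   ("J0", "        #   ### "), ("J1", "    ##  #   #   "), ("J2", "        ###   # "), ("J3", "     #   #  ##  "),
   ("L0", "          # ### "), ("L1", "    #   #   ##  "), ("L2", "        ### #   "), ("L3", "    ##   #   #  ")]

-- ===== PORT A =====
-- A's inner 'for h in range(4): … break', as structural recursion on the h list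
def getTopInner (block : List Char) (startpoint w : Int) : List Int → Int
  | [] => 0                       -- loop ends without break: temptop stays 0
  | h :: hs =>
      let index := w + h * 4
      if PySem.List.slice block (some index) (some (index + 1)) = ['#']
      then 4 - h - (startpoint + 1)
      else getTopInner block startpoint w hs

def getTop (piece : String) (startpoint : Int) : List Int :=
  match typesDict.get? piece with
  | none => []                    -- KeyError in Python; excluded by Pre_getTop
  | some block =>
      (PySem.List.pyRange 1 4 1).foldl
        (fun tops w => tops ++ [getTopInner block.toList startpoint w (PySem.List.pyRange 0 4 1)]) []

-- ===== PORT B =====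
def getTop_alt (piece : String) (startpoint : Int) : List Int :=
  match typesDict.get? piece with
  | none => []                    -- KeyError in Python; excluded by Pre_getTop
  | some block =>
      ([1, 2, 3] : List Int).foldl (fun tops w =>
        -- block[w::4]: slice? = none only for step 0, so getD [] is exact here
        let col := (PySem.List.slice? block.toList (some w) none 4).getD []
        let h := PySem.Chars.find col ['#']
        tops ++ [if h < 0 then 0 else 4 - h - (startpoint + 1)]) []

-- ===== PRECONDITION & SPEC =====
-- Pre_ excludes only pieces outside the 'types' dict, on which A raises KeyError.
def Pre_getTop (piece : String) (startpoint : Int) : Prop :=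
  piece ∈ ["I0", "I1", "O0", "T0", "T1", "T2", "T3", "S0", "S1", "Z0", "Z1",
           "J0", "J1", "J2", "J3", "L0", "L1", "L2", "L3"]
instance (piece : String) (startpoint : Int) : Decidable (Pre_getTop piece startpoint) := by
  unfold Pre_getTop; infer_instance

def pvWitness_getTop : String × Int := ("T1", 0)

def Spec_getTop (piece : String) (startpoint : Int) (out : List Int) : Prop := out = getTop_alt piece startpoint
instance (piece : String) (startpoint : Int) (out : List Int) : Decidable (Spec_getTop piece startpoint out) := by unfold Spec_getTop; infer_instance

-- ===== CLAIM (what is proved, stated in full; the proofs are below) =====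
def Claim_equal_getTop : Prop := ∀ (piece : String) (startpoint : Int), Dom_getTop piece startpoint → Pre_getTop piece startpoint → Spec_getTop piece startpoint (getTop piece startpoint)

-- ===== LEMMAS AND PROOFS =====

-- proof-side helper: the row index of the first '#' that A's inner loop hits
-- in column w (-1 if the loop runs out); its conditions do not mention startpoint
def firstHit (block : List Char) (w : Int) : List Int → Int
  | [] => -1
  | h :: hs =>
      if PySem.List.slice block (some (w + h * 4)) (some (w + h * 4 + 1)) = ['#']
      then h else firstHit block w hs

-- A's inner break-loop, factored through firstHit
theorem innerEq (block : List Char) (s w : Int) (hs : List Int) (hnn : ∀ h ∈ hs, 0 ≤ h) :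
    getTopInner block s w hs =
      (if firstHit block w hs < 0 then 0 else 4 - firstHit block w hs - (s + 1)) := by
  induction hs with
  | nil => rfl
  | cons h t ih =>
      by_cases hc : PySem.List.slice block (some (w + h * 4)) (some (w + h * 4 + 1)) = ['#']
      · have h0 : 0 ≤ h := hnn h (by simp)
        simp only [getTopInner, firstHit, hc, if_pos]
        rw [if_neg (by omega)]
      · simp only [getTopInner, firstHit, hc, if_neg, not_false_iff]
        exact ih (fun x hx => hnn x (by simp [hx]))

theorem pyRange13 : PySem.List.pyRange 1 4 1 = [1, 2, 3] := by decide

theorem pyRange04 : PySem.List.pyRange 0 4 1 = [0, 1, 2, 3] := by decide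

-- for every key, in every column, A's first hit row equals B's str.find on the
-- strided column slice (a closed, startpoint-free fact: checked by the kernel)
theorem hitsOk :
    (["I0", "I1", "O0", "T0", "T1", "T2", "T3", "S0", "S1", "Z0", "Z1",
      "J0", "J1", "J2", "J3", "L0", "L1", "L2", "L3"] : List String).all
      (fun p => (([1, 2, 3] : List Int)).all (fun w =>
        firstHit ((typesDict.get? p).getD "").toList w [0, 1, 2, 3] ==
          PySem.Chars.find
            ((PySem.List.slice? ((typesDict.get? p).getD "").toList (some w) none 4).getD [])
            ['#'])) = true := by decide

-- ===== VERDICT (by name: the statement is the Claim_ definition above) =====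
theorem getTop_spec : Claim_equal_getTop := by
  intro piece s _ hpre
  unfold Spec_getTop
  unfold Pre_getTop at hpre
  have hk := (List.all_eq_true.mp hitsOk) piece hpre
  cases hget : typesDict.get? piece with
  | none => simp [getTop, getTop_alt, hget]
  | some block =>
      rw [hget] at hk
      simp only [Option.getD_some, List.all_cons, List.all_nil, Bool.and_true,
        Bool.and_eq_true, beq_iff_eq] at hk
      obtain ⟨hk1, hk2, hk3⟩ := hk
      have hnn : ∀ h ∈ ([0, 1, 2, 3] : List Int), 0 ≤ h := by decide
      simp only [getTop, getTop_alt, hget, pyRange13, pyRange04, List.foldl]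
      rw [innerEq block.toList s 1 _ hnn, innerEq block.toList s 2 _ hnn,
        innerEq block.toList s 3 _ hnn, hk1, hk2, hk3]
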